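-- pv_equiv track=rewrite | github.com/kimdy003/Python_study | 2_Programmers/level_3/29_스타 수업.py | solution
-- ===== SOURCE A (Python) =====
-- from collections import Counter
--
-- def solution(array):
--     answer = -1
--     element = Counter(array)
--
--     for star in element.keys():
--         if element[star] <= answer:
--             continue
--
--         cnt = 0
--         idx = 0
--         while idx < len(array)-1:
--             if(array[idx] == array[idx+1]) or(array[idx] != star and array[idx+1] != star):
--                 idx += 1
--                 continue
--
--             cnt += 1
--             idx += 2
--         answer = max(answer, cnt)
--
--
--     return answer*2 if answer != -1 else 0
-- ===== SOURCE B (Python) =====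
-- def solution(array):
--     n = len(array)
--     pos = {}
--     for i, v in enumerate(array):
--         pos.setdefault(v, []).append(i)
--     best = 0
--     for star, ps in pos.items():
--         cnt = 0
--         t = 0
--         for p in ps:
--             if p - 1 >= t and array[p - 1] != star:
--                 cnt += 1
--                 t = p + 1
--             elif p + 1 < n and p >= t and array[p + 1] != star:
--                 cnt += 1
--                 t = p + 2
--         best = max(best, cnt)
--     return best * 2
-- ===== Notes on version B (the rewrite author's own statement) =====
-- stated objective: alternative
-- what changed: Instead of rescanning the whole array once per distinct star (with a count-based prune), B groups the occurrence indices of each value in one dict pass and runs the greedy pair-matching only over each star's own occurrence list, so after grouping the work is the sum of the occurrence counts.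
import Mathlib
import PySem

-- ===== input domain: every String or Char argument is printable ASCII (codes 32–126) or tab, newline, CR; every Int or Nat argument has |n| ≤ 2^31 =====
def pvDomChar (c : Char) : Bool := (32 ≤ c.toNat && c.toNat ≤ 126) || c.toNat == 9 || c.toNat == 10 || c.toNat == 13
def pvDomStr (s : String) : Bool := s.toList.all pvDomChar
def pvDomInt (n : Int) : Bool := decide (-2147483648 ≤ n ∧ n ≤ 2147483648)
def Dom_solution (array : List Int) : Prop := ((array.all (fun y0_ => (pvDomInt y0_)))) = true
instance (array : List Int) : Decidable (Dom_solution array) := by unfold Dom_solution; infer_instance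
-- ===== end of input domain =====

-- B replaces A's per-star rescan of the whole array by one greedy pass over each star's
-- own occurrence positions (positions grouped once in a dict), an alternative single-pass algorithm.

-- ===== PORT A =====
-- A's inner while loop; idx is nonnegative throughout in Python, so it is a Nat here and
-- the guard 'idx < len(array) - 1' is written 'idx + 1 < array.length' (equal for every len ≥ 0).
def solutionWhile (array : List Int) (star : Int) (idx : Nat) (cnt : Int) : Int :=
  if idx + 1 < array.length then
    if PySem.List.pyGetD array (idx : Int) 0 = PySem.List.pyGetD array ((idx : Int) + 1) 0 ∨
       (PySem.List.pyGetD array (idx : Int) 0 ≠ star ∧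
        PySem.List.pyGetD array ((idx : Int) + 1) 0 ≠ star) then
      solutionWhile array star (idx + 1) cnt
    else
      solutionWhile array star (idx + 2) (cnt + 1)
  else cnt
termination_by array.length - idx

def solution (array : List Int) : Int :=
  let element := PySem.Dict.counter array
  let answer := element.keys.foldl (fun answer star =>
      if element.getD star 0 ≤ answer then answer
      else max answer (solutionWhile array star 0 0)) (-1)
  if answer ≠ -1 then answer * 2 else 0

-- ===== PORT B =====
-- B's inner for-loop over the star's positions ps; state (cnt, t). The two indexings
-- array[p-1] / array[p+1] are guarded in range (0 ≤ t ≤ p-1 resp. p+1 < n), so pyGetD is exact.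
def solutionAltFor (array : List Int) (n : Int) (star : Int) (ps : List Int) : Int × Int :=
  ps.foldl (fun (s : Int × Int) p =>
    if p - 1 ≥ s.2 ∧ PySem.List.pyGetD array (p - 1) 0 ≠ star then (s.1 + 1, p + 1)
    else if p + 1 < n ∧ p ≥ s.2 ∧ PySem.List.pyGetD array (p + 1) 0 ≠ star then (s.1 + 1, p + 2)
    else s) (0, 0)

def solution_alt (array : List Int) : Int :=
  let n : Int := array.length
  let pos := (PySem.List.enumerate array).foldl
      (fun d p => d.modify p.2 [] (· ++ [p.1])) PySem.Dict.empty
  let best := pos.items.foldl (fun best q => max best (solutionAltFor array n q.1 q.2).1) 0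
  best * 2

-- ===== PRECONDITION & SPEC =====
def Spec_solution (array : List Int) (out : Int) : Prop := out = solution_alt array
instance (array : List Int) (out : Int) : Decidable (Spec_solution array out) := by unfold Spec_solution; infer_instance

-- ===== CLAIM (what is proved, stated in full; the proofs are below) =====
def Claim_equal_solution : Prop := ∀ (array : List Int), Dom_solution array → Spec_solution array (solution array)

-- ===== LEMMAS AND PROOFS =====

-- a[i] as the ports read it (both only read in-range indices)
def av (a : List Int) (i : Nat) : Int := a.getD i 0

-- proof-side Nat version of A's while loop (no accumulator)
def gN (a : List Int) (s : Int) (i : Nat) : Nat :=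
  if i + 1 < a.length then
    if av a i = av a (i + 1) ∨ (av a i ≠ s ∧ av a (i + 1) ≠ s) then gN a s (i + 1)
    else 1 + gN a s (i + 2)
  else 0
termination_by a.length - i

-- proof-side Nat version of B's inner loop
def bN (a : List Int) (s : Int) : List Nat → Nat → Nat
  | [], _ => 0
  | p :: rest, t =>
    if t + 1 ≤ p ∧ av a (p - 1) ≠ s then 1 + bN a s rest (p + 1)
    else if p + 1 < a.length ∧ t ≤ p ∧ av a (p + 1) ≠ s then 1 + bN a s rest (p + 2)
    else bN a s rest t

-- index i starts an eligible pair for star s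
def elig (a : List Int) (s : Int) (i : Nat) : Prop :=
  i + 1 < a.length ∧ av a i ≠ av a (i + 1) ∧ (av a i = s ∨ av a (i + 1) = s)

-- the occurrence positions of s in a
def occ (a : List Int) (s : Int) : List Nat :=
  (List.range a.length).filter (fun k => av a k == s)

lemma solutionWhile_eq (a : List Int) (s : Int) :
    ∀ fuel i, a.length - i ≤ fuel → ∀ c, solutionWhile a s i c = c + (gN a s i : Int) := by
  intro fuel
  induction fuel with
  | zero =>
    intro i hi c
    rw [solutionWhile, gN]
    have : ¬ (i + 1 < a.length) := by omega
    simp [this]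
  | succ fuel ih =>
    intro i hi c
    rw [solutionWhile, gN]
    by_cases h1 : i + 1 < a.length
    · have e0 : PySem.List.pyGetD a (i : Int) 0 = av a i := PySem.List.pyGetD_natCast a i 0
      have e1 : PySem.List.pyGetD a ((i : Int) + 1) 0 = av a (i + 1) := by
        have : ((i : Int) + 1) = ((i + 1 : Nat) : Int) := by push_cast; ring
        rw [this]; exact PySem.List.pyGetD_natCast a (i + 1) 0
      by_cases h2 : av a i = av a (i + 1) ∨ (av a i ≠ s ∧ av a (i + 1) ≠ s)
      · simp only [h1, e0, e1, h2, if_pos]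
        exact ih (i + 1) (by omega) c
      · simp only [h1, if_true, e0, e1, h2, if_neg, not_false_iff]
        rw [ih (i + 2) (by omega) (c + 1)]
        push_cast; ring
    · simp [h1]

lemma gN_of_no_elig (a : List Int) (s : Int) :
    ∀ fuel t, a.length - t ≤ fuel → (∀ i, t ≤ i → ¬ elig a s i) → gN a s t = 0 := by
  intro fuel
  induction fuel with
  | zero =>
    intro t ht _
    rw [gN]
    have : ¬ (t + 1 < a.length) := by omega
    simp [this]
  | succ fuel ih =>
    intro t ht hno
    rw [gN]
    by_cases h1 : t + 1 < a.length
    · have hsk : av a t = av a (t + 1) ∨ (av a t ≠ s ∧ av a (t + 1) ≠ s) := by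
        have := hno t le_rfl
        unfold elig at this
        by_cases hd : av a t = av a (t + 1)
        · exact Or.inl hd
        · refine Or.inr ⟨?_, ?_⟩ <;> · intro hs; exact this ⟨h1, hd, by tauto⟩
      simp only [h1, hsk, if_pos]
      exact ih (t + 1) (by omega) (fun i hi => hno i (by omega))
    · simp [h1]

lemma gN_of_first_elig (a : List Int) (s : Int) :
    ∀ fuel t m, m - t ≤ fuel → t ≤ m → elig a s m →
      (∀ i, t ≤ i → i < m → ¬ elig a s i) → gN a s t = 1 + gN a s (m + 2) := by
  intro fuel
  induction fuel with
  | zero =>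
    intro t m hf htm hm _
    have : t = m := by omega
    subst this
    obtain ⟨h1, hd, _⟩ := hm
    rw [gN]
    have hsk : ¬ (av a t = av a (t + 1) ∨ (av a t ≠ s ∧ av a (t + 1) ≠ s)) := by tauto
    simp [h1, hsk]
  | succ fuel ih =>
    intro t m hf htm hm hmin
    by_cases heq : t = m
    · subst heq
      obtain ⟨h1, hd, _⟩ := hm
      rw [gN]
      have hsk : ¬ (av a t = av a (t + 1) ∨ (av a t ≠ s ∧ av a (t + 1) ≠ s)) := by tauto
      simp [h1, hsk]
    · have htm' : t < m := by omega
      have h1 : t + 1 < a.length := by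
        have := hm.1; omega
      have hnt : ¬ elig a s t := hmin t le_rfl htm'
      have hsk : av a t = av a (t + 1) ∨ (av a t ≠ s ∧ av a (t + 1) ≠ s) := by
        unfold elig at hnt
        by_cases hd : av a t = av a (t + 1)
        · exact Or.inl hd
        · refine Or.inr ⟨?_, ?_⟩ <;> · intro hs; exact hnt ⟨h1, hd, by tauto⟩
      rw [gN]
      simp only [h1, hsk, if_pos]
      exact ih (t + 1) m (by omega) (by omega) hm (fun i hi him => hmin i (by omega) him)

lemma mem_occ (a : List Int) (s : Int) (k : Nat) :
    k ∈ occ a s ↔ k < a.length ∧ av a k = s := by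
  simp [occ, List.mem_filter, List.mem_range]

lemma occ_pairwise (a : List Int) (s : Int) : (occ a s).Pairwise (· < ·) :=
  List.Pairwise.filter _ List.pairwise_lt_range

-- the heart: A's scan over the whole array equals B's scan over the occurrence positions
lemma gN_eq_bN (a : List Int) (s : Int) :
    ∀ ps t, ps.Pairwise (· < ·) →
      (∀ p ∈ ps, p < a.length ∧ av a p = s) →
      (∀ i, t ≤ i → elig a s i → (av a i = s → i ∈ ps) ∧ (av a (i + 1) = s → i + 1 ∈ ps)) →
      gN a s t = bN a s ps t := by
  intro ps
  induction ps with
  | nil =>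
    intro t _ _ hinv
    rw [bN]
    refine gN_of_no_elig a s (a.length - t) t le_rfl ?_
    intro i hi he
    rcases he.2.2 with hs | hs
    · exact absurd ((hinv i hi he).1 hs) (List.not_mem_nil)
    · exact absurd ((hinv i hi he).2 hs) (List.not_mem_nil)
  | cons p rest ihp =>
    intro t hsort hmem hinv
    have hge : ∀ q ∈ p :: rest, p ≤ q := by
      intro q hq
      rcases List.mem_cons.1 hq with rfl | hq
      · exact le_rfl
      · exact le_of_lt (List.rel_of_pairwise_cons hsort hq)
    have hp : p < a.length ∧ av a p = s := hmem p List.mem_cons_self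
    rw [bN]
    by_cases hc1 : t + 1 ≤ p ∧ av a (p - 1) ≠ s
    · -- match at idx = p - 1
      have hp1 : 1 ≤ p := by omega
      have he : elig a s (p - 1) := by
        refine ⟨by omega, ?_, ?_⟩
        · have : p - 1 + 1 = p := by omega
          rw [this, hp.2]; exact hc1.2
        · have : p - 1 + 1 = p := by omega
          rw [this]; exact Or.inr hp.2
      have hmin : ∀ i, t ≤ i → i < p - 1 → ¬ elig a s i := by
        intro i hti hip he'
        have h1 := (hinv i hti he').1
        have h2 := (hinv i hti he').2
        rcases he'.2.2 with hs | hs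
        · have := hge i (h1 hs); omega
        · have := hge (i + 1) (h2 hs); omega
      have := gN_of_first_elig a s (p - 1 - t) t (p - 1) le_rfl (by omega) he hmin
      rw [if_pos hc1, this]
      have hstep : p - 1 + 2 = p + 1 := by omega
      rw [hstep]
      congr 1
      refine ihp (p + 1) (List.Pairwise.of_cons hsort)
        (fun q hq => hmem q (List.mem_cons_of_mem _ hq)) ?_
      intro i hi he'
      have h12 := hinv i (by omega) he'
      constructor
      · intro hs
        rcases List.mem_cons.1 (h12.1 hs) with rfl | h
        · omega
        · exact h
      · intro hs
        rcases List.mem_cons.1 (h12.2 hs) with heq | h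
        · omega
        · exact h
    · by_cases hc2 : p + 1 < a.length ∧ t ≤ p ∧ av a (p + 1) ≠ s
      · -- match at idx = p
        have he : elig a s p := ⟨hc2.1, by rw [hp.2]; exact Ne.symm hc2.2.2, Or.inl hp.2⟩
        have hmin : ∀ i, t ≤ i → i < p → ¬ elig a s i := by
          intro i hti hip he'
          have h12 := hinv i hti he'
          rcases he'.2.2 with hs | hs
          · have := hge i (h12.1 hs); omega
          · have hq := hge (i + 1) (h12.2 hs)
            have : i + 1 = p := by omega
            -- then i = p - 1 and elig (p-1) would make hc1 true
            have hip1 : i = p - 1 := by omega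
            apply hc1
            refine ⟨by omega, ?_⟩
            intro hcon
            apply he'.2.1
            have h1 : av a i = s := by rw [hip1]; exact hcon
            rw [h1, hs]
        have := gN_of_first_elig a s (p - t) t p le_rfl hc2.2.1 he hmin
        rw [if_neg hc1, if_pos hc2, this]
        congr 1
        refine ihp (p + 2) (List.Pairwise.of_cons hsort)
          (fun q hq => hmem q (List.mem_cons_of_mem _ hq)) ?_
        intro i hi he'
        have h12 := hinv i (by omega) he'
        constructor
        · intro hs
          rcases List.mem_cons.1 (h12.1 hs) with rfl | h
          · omega
          · exact h
        · intro hs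
          rcases List.mem_cons.1 (h12.2 hs) with heq | h
          · omega
          · exact h
      · -- p contributes no eligible pair ≥ t: drop it
        rw [if_neg hc1, if_neg hc2]
        refine ihp t (List.Pairwise.of_cons hsort)
          (fun q hq => hmem q (List.mem_cons_of_mem _ hq)) ?_
        intro i hi he'
        have h12 := hinv i hi he'
        constructor
        · intro hs
          rcases List.mem_cons.1 (h12.1 hs) with rfl | h
          · -- i = p: then hc2 would hold
            exfalso
            apply hc2
            refine ⟨he'.1, hi, ?_⟩
            intro hcon
            exact he'.2.1 (by rw [hp.2, hcon])
          · exact h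
        · intro hs
          rcases List.mem_cons.1 (h12.2 hs) with heq | h
          · -- i + 1 = p: then hc1 would hold
            exfalso
            apply hc1
            refine ⟨by omega, ?_⟩
            have hpi : p - 1 = i := by omega
            rw [hpi]
            exact fun hcon => he'.2.1 (hcon.trans hs.symm)
          · exact h

lemma gN_eq_bN_occ (a : List Int) (s : Int) : gN a s 0 = bN a s (occ a s) 0 := by
  refine gN_eq_bN a s (occ a s) 0 (occ_pairwise a s)
    (fun p hp => (mem_occ a s p).1 hp) ?_
  intro i _ he
  have hlen := he.1
  exact ⟨fun hs => (mem_occ a s i).2 ⟨by omega, hs⟩,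
         fun hs => (mem_occ a s (i + 1)).2 ⟨hlen, hs⟩⟩

lemma bN_le_length (a : List Int) (s : Int) :
    ∀ ps t, bN a s ps t ≤ ps.length := by
  intro ps
  induction ps with
  | nil => intro t; simp [bN]
  | cons p rest ih =>
    intro t
    rw [bN]
    split_ifs with h1 h2
    · have := ih (p + 1); simp; omega
    · have := ih (p + 2); simp; omega
    · have := ih t; simp; omega

lemma length_occ_eq_count (a : List Int) (s : Int) : (occ a s).length = a.count s := by
  induction a with
  | nil => simp [occ]
  | cons x xs ih =>
    have hpred : ((fun k => av (x :: xs) k == s) ∘ Nat.succ) = (fun k => av xs k == s) := by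
      funext k; rfl
    have hx : av (x :: xs) 0 = x := rfl
    rw [List.count_cons, ← ih]
    unfold occ
    rw [List.length_cons, List.range_succ_eq_map, List.filter_cons, List.filter_map, hpred, hx]
    split_ifs with h <;> simp

lemma gN_le_count (a : List Int) (s : Int) : gN a s 0 ≤ a.count s := by
  rw [gN_eq_bN_occ, ← length_occ_eq_count]
  exact bN_le_length a s (occ a s) 0

-- B's Int-state inner loop computes bN on the Nat positions
lemma solutionAltFor_eq (a : List Int) (s : Int) :
    ∀ (ks : List Nat) (c : Int) (t : Nat),
      ((ks.map (fun (k : Nat) => (k : Int))).foldl (fun (st : Int × Int) p =>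
        if p - 1 ≥ st.2 ∧ PySem.List.pyGetD a (p - 1) 0 ≠ s then (st.1 + 1, p + 1)
        else if p + 1 < (a.length : Int) ∧ p ≥ st.2 ∧ PySem.List.pyGetD a (p + 1) 0 ≠ s then (st.1 + 1, p + 2)
        else st) (c, (t : Int))).1 = c + (bN a s ks t : Int) := by
  intro ks
  induction ks with
  | nil => intro c t; simp [bN]
  | cons k rest ih =>
    intro c t
    rw [List.map_cons, List.foldl_cons, bN]
    by_cases h1 : t + 1 ≤ k ∧ av a (k - 1) ≠ s
    · have hcast : ((k : Int) - 1) = ((k - 1 : Nat) : Int) := by omega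
      have e : PySem.List.pyGetD a ((k : Int) - 1) 0 = av a (k - 1) := by
        rw [hcast]; exact PySem.List.pyGetD_natCast a (k - 1) 0
      have hcond : ((k : Int) - 1 ≥ (t : Int) ∧ PySem.List.pyGetD a ((k : Int) - 1) 0 ≠ s) := by
        refine ⟨by omega, by rw [e]; exact h1.2⟩
      rw [if_pos h1, if_pos hcond]
      have h2 : ((k : Int) + 1) = ((k + 1 : Nat) : Int) := by push_cast; ring
      rw [h2, ih (c + 1) (k + 1)]
      push_cast; ring
    · have hcond : ¬ ((k : Int) - 1 ≥ (t : Int) ∧ PySem.List.pyGetD a ((k : Int) - 1) 0 ≠ s) := by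
        intro hcon
        apply h1
        have hk1 : t + 1 ≤ k := by omega
        have hcast : ((k : Int) - 1) = ((k - 1 : Nat) : Int) := by omega
        have e : PySem.List.pyGetD a ((k : Int) - 1) 0 = av a (k - 1) := by
          rw [hcast]; exact PySem.List.pyGetD_natCast a (k - 1) 0
        exact ⟨hk1, by rw [← e]; exact hcon.2⟩
      rw [if_neg hcond]
      have e1 : PySem.List.pyGetD a ((k : Int) + 1) 0 = av a (k + 1) := by
        have : ((k : Int) + 1) = ((k + 1 : Nat) : Int) := by push_cast; ring
        rw [this]; exact PySem.List.pyGetD_natCast a (k + 1) 0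
      by_cases h2 : k + 1 < a.length ∧ t ≤ k ∧ av a (k + 1) ≠ s
      · have hcond2 : ((k : Int) + 1 < (a.length : Int) ∧ (k : Int) ≥ (t : Int) ∧
            PySem.List.pyGetD a ((k : Int) + 1) 0 ≠ s) := by
          refine ⟨by exact_mod_cast (by omega : ((k + 1 : Nat) : Int) < (a.length : Int)), by omega, ?_⟩
          rw [e1]; exact h2.2.2
        rw [if_neg h1, if_pos h2, if_pos hcond2]
        have h3 : ((k : Int) + 2) = ((k + 2 : Nat) : Int) := by push_cast; ring
        rw [h3, ih (c + 1) (k + 2)]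
        push_cast; ring
      · have hcond2 : ¬ ((k : Int) + 1 < (a.length : Int) ∧ (k : Int) ≥ (t : Int) ∧
            PySem.List.pyGetD a ((k : Int) + 1) 0 ≠ s) := by
          intro hcon
          exact h2 ⟨by omega, by omega, by rw [← e1]; exact hcon.2.2⟩
        rw [if_neg h1, if_neg h2, if_neg hcond2]
        exact ih c t

-- the position lists B builds are exactly occ, cast to Int
lemma pos_getD (a : List Int) (c : Int) :
    (((PySem.List.enumerate a).foldl
        (fun d p => d.modify p.2 [] (· ++ [p.1])) PySem.Dict.empty).getD c []) =
      (occ a c).map (fun (k : Nat) => (k : Int)) := by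
  have hswap : (PySem.List.enumerate a).foldl
      (fun d p => d.modify p.2 [] (· ++ [p.1])) (PySem.Dict.empty : PySem.Dict Int (List Int)) =
      ((PySem.List.enumerate a).map Prod.swap).foldl
        (fun d p => d.modify p.1 [] (· ++ [p.2])) PySem.Dict.empty := by
    rw [List.foldl_map]
    rfl
  rw [hswap, PySem.Dict.getD_foldl_modify_append]
  have he : (PySem.List.enumerate a).map Prod.swap =
      (List.range a.length).map (fun (k : Nat) => (av a k, (k : Int))) := by
    rw [PySem.List.enumerate_eq_map_pyRange a 0]
    have : PySem.List.len a = (a.length : Int) := by simp [PySem.List.len]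
    rw [this, PySem.List.pyRange_zero_natCast, List.map_map, List.map_map]
    refine List.map_congr_left ?_
    intro k hk
    simp [Function.comp, Prod.swap, PySem.List.pyGetD_natCast, av]
  rw [he, List.filter_map, List.map_map]
  have : ((fun p => p.1 == c) ∘ fun (k : Nat) => (av a k, (k : Int))) = (fun (k : Nat) => av a k == c) := by
    funext k; rfl
  rw [this]
  simp [occ]

lemma pos_keys (a : List Int) :
    ((PySem.List.enumerate a).foldl
        (fun d p => d.modify p.2 [] (· ++ [p.1])) (PySem.Dict.empty : PySem.Dict Int (List Int))).keys =
      PySem.Set.ofList a := by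
  rw [PySem.Dict.keys_foldl_modify_key (PySem.List.enumerate a) (fun p => p.2) []
    (fun _ p => (· ++ [p.1])) PySem.Dict.empty]
  have : (PySem.Dict.empty : PySem.Dict Int (List Int)).keys = [] := rfl
  rw [this, PySem.Set.update_nil_left, PySem.List.map_snd_enumerate]

lemma prune_fold_eq (a : List Int) :
    ∀ (ks : List Int) (c : Int),
      ks.foldl (fun ans star =>
        if ((a.count star : Int)) ≤ ans then ans
        else max ans ((gN a star 0 : Int))) c =
      ks.foldl (fun ans star => max ans ((gN a star 0 : Int))) c := by
  intro ks
  induction ks with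
  | nil => intro c; rfl
  | cons k rest ih =>
    intro c
    rw [List.foldl_cons, List.foldl_cons]
    by_cases h : ((a.count k : Int)) ≤ c
    · have hg : (gN a k 0 : Int) ≤ c := le_trans (by exact_mod_cast gN_le_count a k) h
      rw [if_pos h, max_eq_left hg]
      exact ih c
    · rw [if_neg h]
      exact ih (max c ((gN a k 0 : Int)))

lemma fold_max_init (a : List Int) (ks : List Int) (x : Int) :
    (x :: ks).foldl (fun ans star => max ans ((gN a star 0 : Int))) (-1) =
    (x :: ks).foldl (fun ans star => max ans ((gN a star 0 : Int))) 0 := by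
  rw [List.foldl_cons, List.foldl_cons]
  have h0 : (0 : Int) ≤ (gN a x 0 : Int) := by positivity
  rw [max_eq_right (by omega), max_eq_right h0]

theorem solution_eq_alt (array : List Int) : solution array = solution_alt array := by
  unfold solution solution_alt
  simp only [PySem.Dict.keys_counter, PySem.Dict.getD_counter]
  -- rewrite A's inner loop to gN and drop the prune
  have hA : ∀ star : Int, solutionWhile array star 0 0 = (gN array star 0 : Int) := by
    intro star
    have := solutionWhile_eq array star array.length 0 (by omega) 0
    simpa using this
  have hbodyA : (fun (answer star : Int) =>
      if ((List.count star array : Nat) : Int) ≤ answer then answer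
      else max answer (solutionWhile array star 0 0)) =
      (fun (answer star : Int) =>
      if ((array.count star : Nat) : Int) ≤ answer then answer
      else max answer ((gN array star 0 : Int))) := by
    funext answer star
    rw [hA star]
  rw [hbodyA, prune_fold_eq]
  -- rewrite B's fold over items into a fold over the same key list with gN values
  have hnod : (((PySem.List.enumerate array).foldl
      (fun d p => d.modify p.2 [] (· ++ [p.1])) (PySem.Dict.empty : PySem.Dict Int (List Int)))).keys.Nodup := by
    refine PySem.Dict.nodup_keys_foldl_modify_key (PySem.List.enumerate array) (fun p => p.2) []
      (fun _ p => (· ++ [p.1])) PySem.Dict.empty ?_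
    simp [PySem.Dict.keys, PySem.Dict.empty]
  rw [PySem.Dict.items_eq_map_keys _ hnod [], List.foldl_map, pos_keys]
  have hbodyB : (fun (best : Int) (k : Int) =>
      max best (solutionAltFor array (array.length : Int) ((fun k => (k, (((PySem.List.enumerate array).foldl
        (fun d p => d.modify p.2 [] (· ++ [p.1])) PySem.Dict.empty).getD k []))) k).1
        ((fun k => (k, (((PySem.List.enumerate array).foldl
        (fun d p => d.modify p.2 [] (· ++ [p.1])) PySem.Dict.empty).getD k []))) k).2).1) =
      (fun (best k : Int) => max best ((gN array k 0 : Int))) := by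
    funext best k
    simp only
    rw [pos_getD]
    unfold solutionAltFor
    have h := solutionAltFor_eq array k (occ array k) 0 0
    simp only [Nat.cast_zero, zero_add] at h
    rw [h, gN_eq_bN_occ]
  rw [hbodyB]
  -- compare the two folds
  cases harr : array with
  | nil => simp [PySem.Set.ofList]
  | cons x xs =>
    rw [← harr]
    have hks : PySem.Set.ofList array = x :: (PySem.Set.ofList xs).discard x := by
      rw [harr, PySem.Set.ofList_cons]
    rw [hks, fold_max_init]
    have hpos := (PySem.List.le_foldl_max_int ((PySem.Set.ofList xs).discard x)
      (fun star => (gN array star 0 : Int)) (max 0 ((gN array x 0 : Int)))).1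
    rw [List.foldl_cons]
    have hne : ((PySem.Set.ofList xs).discard x).foldl
        (fun ans star => max ans ((gN array star 0 : Int))) (max 0 ((gN array x 0 : Int))) ≠ -1 := by
      have h0 : (0 : Int) ≤ max 0 ((gN array x 0 : Int)) := le_max_left _ _
      omega
    rw [if_pos hne]

-- ===== VERDICT (by name: the statement is the Claim_ definition above) =====
theorem solution_spec : Claim_equal_solution := by
  intro array _
  unfold Spec_solution
  exact solution_eq_alt array
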